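-- pv_equiv track=rewrite | github.com/ntoonio/calproxy | cal.py | eventsToiCal
-- ===== SOURCE A (Python) =====
-- ESCAPES = [["\\\\", "\\"], ["\\;", ";"], ["\\,", ","], ["\\n", "\n"], ["\\N", "\n"]]
--
-- def eventsToiCal(events):
-- 	o = """BEGIN:VCALENDAR
-- VERSION:2.0
-- METHOD:PUBLISH
-- X-WR-CALNAME:Temp-name
-- X-WR-CALDESC:Date limit -
-- X-PUBLISHED-TTL:PT20M
-- CALSCALE:GREGORIAN
-- PRODID:Temp-prod-id""" + "\n"
--
-- 	for event in events:
-- 		o += "BEGIN:VEVENT" + "\n"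
--
-- 		for key in event:
-- 			value = event[key]
-- 			for r in ESCAPES:
-- 				value = value.replace(r[1], r[0])
-- 			o += key + ":" + value + "\n"
--
-- 		o += "END:VEVENT" + "\n"
--
-- 	o += "END:VCALENDAR" + "\n"
--
-- 	return o
-- ===== SOURCE B (Python) =====
-- ESC = {"\\": "\\\\", ";": "\\;", ",": "\\,", "\n": "\\n"}
--
-- HEADER = """BEGIN:VCALENDAR
-- VERSION:2.0
-- METHOD:PUBLISH
-- X-WR-CALNAME:Temp-name
-- X-WR-CALDESC:Date limit -
-- X-PUBLISHED-TTL:PT20M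
-- CALSCALE:GREGORIAN
-- PRODID:Temp-prod-id
-- """
--
-- def _vevent(event):
-- 	return "BEGIN:VEVENT\n" + "".join(
-- 		k + ":" + "".join(ESC.get(c, c) for c in v) + "\n" for k, v in event.items()
-- 	) + "END:VEVENT\n"
--
-- def _blocks(events):
-- 	# balanced divide-and-conquer concatenation of the event blocks
-- 	if len(events) == 0:
-- 		return ""
-- 	if len(events) == 1:
-- 		return _vevent(events[0])
-- 	mid = len(events) // 2
-- 	return _blocks(events[:mid]) + _blocks(events[mid:])
--
-- def eventsToiCal(events):
-- 	return HEADER + _blocks(events) + "END:VCALENDAR\n"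
-- ===== Notes on version B (the rewrite author's own statement) =====
-- stated objective: alternative
-- what changed: B escapes each value in one per-character pass via a dict lookup (dropping the dead '\N' pass) and formats each event as a self-contained block from its items, assembling the body by balanced divide-and-conquer concatenation over the event list instead of A's sequential left-to-right accumulation with five full-string .replace rescans per value.
import Mathlib
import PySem

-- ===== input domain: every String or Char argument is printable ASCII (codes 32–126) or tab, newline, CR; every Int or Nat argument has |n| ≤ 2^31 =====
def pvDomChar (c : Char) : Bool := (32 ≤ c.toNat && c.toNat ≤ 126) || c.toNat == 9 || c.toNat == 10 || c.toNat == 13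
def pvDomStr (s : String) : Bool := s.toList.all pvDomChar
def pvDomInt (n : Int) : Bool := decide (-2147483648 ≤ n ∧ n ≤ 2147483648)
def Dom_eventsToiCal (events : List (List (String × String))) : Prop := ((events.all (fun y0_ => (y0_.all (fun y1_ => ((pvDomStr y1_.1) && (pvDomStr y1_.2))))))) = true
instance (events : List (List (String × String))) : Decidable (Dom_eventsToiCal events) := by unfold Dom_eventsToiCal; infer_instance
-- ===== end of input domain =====

-- B escapes each value in one per-character dict-lookup pass (dropping the dead '\N'
-- pass), formats each event as a self-contained block, and assembles the body by
-- balanced divide-and-conquer concatenation instead of A's sequential accumulation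
-- with five full-string .replace rescans per value (objective: alternative).

-- ===== PORT A =====
-- value = value.replace(r[1], r[0]) for each r in ESCAPES (five sequential passes)
def escA (v : List Char) : List Char :=
  let v1 := PySem.Chars.replace v ['\\'] ['\\', '\\']
  let v2 := PySem.Chars.replace v1 [';'] ['\\', ';']
  let v3 := PySem.Chars.replace v2 [','] ['\\', ',']
  let v4 := PySem.Chars.replace v3 ['\n'] ['\\', 'n']
  PySem.Chars.replace v4 ['\n'] ['\\', 'N']

def eventsToiCal (events : List (List (String × String))) : String :=
  -- o starts as the header; each event appends BEGIN, one line per key (value = event[key],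
  -- first-match lookup, escaped by the five replace passes), then END; finally END:VCALENDAR
  String.mk ((events.foldl (fun o event =>
      ((event.map Prod.fst).foldl (fun o key =>
          o ++ (key.toList ++ ":".toList ++ escA ((event.lookup key).getD "").toList ++ "\n".toList))
        (o ++ ("BEGIN:VEVENT".toList ++ "\n".toList)))
      ++ ("END:VEVENT".toList ++ "\n".toList))
    (("BEGIN:VCALENDAR\nVERSION:2.0\nMETHOD:PUBLISH\nX-WR-CALNAME:Temp-name\nX-WR-CALDESC:Date limit -\nX-PUBLISHED-TTL:PT20M\nCALSCALE:GREGORIAN\nPRODID:Temp-prod-id").toList ++ "\n".toList))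
    ++ ("END:VCALENDAR".toList ++ "\n".toList))

-- ===== PORT B =====
-- ESC = {"\\": "\\\\", ";": "\\;", ",": "\\,", "\n": "\\n"} (single-char keys)
def pvEscTable : List (Char × List Char) :=
  [('\\', ['\\', '\\']), (';', ['\\', ';']), (',', ['\\', ',']), ('\n', ['\\', 'n'])]

-- "".join(ESC.get(c, c) for c in v): one lookup per character
def escB (v : List Char) : List Char :=
  v.flatMap (fun c => (pvEscTable.lookup c).getD [c])

-- "BEGIN:VEVENT\n" + "".join(k + ":" + esc(v) + "\n" for k, v in event.items()) + "END:VEVENT\n"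
def veventB (event : List (String × String)) : List Char :=
  "BEGIN:VEVENT\n".toList
    ++ (event.map (fun kv => kv.1.toList ++ ":".toList ++ escB kv.2.toList ++ "\n".toList)).flatten
    ++ "END:VEVENT\n".toList

-- _blocks: balanced divide-and-conquer concatenation of the event blocks
-- (fuel = events.length bounds the recursion depth; it only makes the same
-- computation total and is never hit: each half is strictly shorter)
def blocksB (fuel : Nat) (events : List (List (String × String))) : List Char :=
  match fuel, events with
  | _, [] => []
  | _, [e] => veventB e
  | 0, _ => []
  | f + 1, e1 :: e2 :: rest =>
      blocksB f ((e1 :: e2 :: rest).take ((e1 :: e2 :: rest).length / 2))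
        ++ blocksB f ((e1 :: e2 :: rest).drop ((e1 :: e2 :: rest).length / 2))

def eventsToiCal_alt (events : List (List (String × String))) : String :=
  String.mk (("BEGIN:VCALENDAR\nVERSION:2.0\nMETHOD:PUBLISH\nX-WR-CALNAME:Temp-name\nX-WR-CALDESC:Date limit -\nX-PUBLISHED-TTL:PT20M\nCALSCALE:GREGORIAN\nPRODID:Temp-prod-id\n").toList
    ++ blocksB events.length events ++ "END:VCALENDAR\n".toList)

-- ===== PRECONDITION & SPEC =====
-- Pre_ excludes only association lists in which some event has a duplicate key:
-- such lists do not represent any Python dict (A's parameter type), so A is never run on them.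
def Pre_eventsToiCal (events : List (List (String × String))) : Prop :=
  ∀ e ∈ events, (e.map Prod.fst).Nodup
instance (events : List (List (String × String))) : Decidable (Pre_eventsToiCal events) := by
  unfold Pre_eventsToiCal; infer_instance

def pvWitness_eventsToiCal : (List (List (String × String))) :=
  [[("SUMMARY", "a;b"), ("LOCATION", "x,y\nz")], []]

def Spec_eventsToiCal (events : List (List (String × String))) (out : String) : Prop := out = eventsToiCal_alt events
instance (events : List (List (String × String))) (out : String) : Decidable (Spec_eventsToiCal events out) := by unfold Spec_eventsToiCal; infer_instance

-- ===== CLAIM (what is proved, stated in full; the proofs are below) =====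
def Claim_equal_eventsToiCal : Prop := ∀ (events : List (List (String × String))), Dom_eventsToiCal events → Pre_eventsToiCal events → Spec_eventsToiCal events (eventsToiCal events)

-- ===== LEMMAS AND PROOFS =====

-- first-match lookup in a duplicate-free association list returns the pair's own value
theorem pv_lookup_nodup (l : List (String × String)) (h : (l.map Prod.fst).Nodup)
    (kv : String × String) (hm : kv ∈ l) : l.lookup kv.1 = some kv.2 := by
  induction l with
  | nil => cases hm
  | cons a t ih =>
    simp only [List.map_cons, List.nodup_cons] at h
    rcases List.mem_cons.mp hm with rfl | hm'
    · simp [List.lookup]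
    · have hne : (kv.1 == a.1) = false :=
        beq_eq_false_iff_ne.mpr (fun he => h.1 (he ▸ (List.mem_map.mpr ⟨kv, hm', rfl⟩)))
      simp only [List.lookup, hne]
      exact ih h.2 hm'

-- str.replace with a single-character pattern is a per-character flatMap
theorem pv_go_single (o : Char) (new : List Char) :
    ∀ (s : List Char) (fuel : Nat) (acc : List Char), s.length ≤ fuel →
      PySem.Chars.replace.go [o] new fuel s acc
        = acc.reverse ++ s.flatMap (fun c => if c = o then new else [c]) := by
  intro s
  induction s with
  | nil => intro fuel acc _; cases fuel <;> simp [PySem.Chars.replace.go]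
  | cons c t ih =>
    intro fuel acc hle
    cases fuel with
    | zero => simp at hle
    | succ f =>
      simp only [PySem.Chars.replace.go]
      by_cases hc : c = o
      · subst hc
        have hp : [c].isPrefixOf (c :: t) = true := by simp [List.isPrefixOf]
        simp only [hp, if_true, List.length_cons, List.length_nil, List.drop_succ_cons, List.drop_zero]
        rw [ih f (new.reverse ++ acc) (by simpa using hle)]
        simp
      · have hp : [o].isPrefixOf (c :: t) = false := by
          simp [List.isPrefixOf]; exact fun h => hc h.symm
        simp only [hp, Bool.false_eq_true, if_false]
        rw [ih f (c :: acc) (by simpa using hle)]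
        simp [hc]

theorem pv_replace_single (s : List Char) (o : Char) (new : List Char) :
    PySem.Chars.replace s [o] new = s.flatMap (fun c => if c = o then new else [c]) := by
  simp [PySem.Chars.replace]
  exact pv_go_single o new s s.length [] le_rfl

-- the net per-character escaping both programs perform
def escF (c : Char) : List Char :=
  if c = '\\' then ['\\', '\\'] else if c = ';' then ['\\', ';']
  else if c = ',' then ['\\', ','] else if c = '\n' then ['\\', 'n'] else [c]

theorem pv_escB_eq (v : List Char) : escB v = v.flatMap escF := by
  unfold escB
  refine List.flatMap_congr (fun c _ => ?_)
  by_cases h1 : c = '\\'; · subst h1; rfl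
  by_cases h2 : c = ';'; · subst h2; rfl
  by_cases h3 : c = ','; · subst h3; rfl
  by_cases h4 : c = '\n'; · subst h4; rfl
  have n1 : (c == '\\') = false := beq_eq_false_iff_ne.mpr h1
  have n2 : (c == ';') = false := beq_eq_false_iff_ne.mpr h2
  have n3 : (c == ',') = false := beq_eq_false_iff_ne.mpr h3
  have n4 : (c == '\n') = false := beq_eq_false_iff_ne.mpr h4
  simp [pvEscTable, List.lookup, n1, n2, n3, n4, escF, h1, h2, h3, h4]

theorem pv_escA_eq (v : List Char) : escA v = v.flatMap escF := by
  simp only [escA, pv_replace_single, List.flatMap_assoc]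
  refine List.flatMap_congr (fun c _ => ?_)
  by_cases h1 : c = '\\'; · subst h1; rfl
  by_cases h2 : c = ';'; · subst h2; rfl
  by_cases h3 : c = ','; · subst h3; rfl
  by_cases h4 : c = '\n'; · subst h4; rfl
  simp [escF, h1, h2, h3, h4]

-- one escaped "key:value\n" line, the form both programs produce
def lineF (kv : String × String) : List Char :=
  kv.1.toList ++ ":".toList ++ kv.2.toList.flatMap escF ++ "\n".toList

def blockF (e : List (String × String)) : List Char :=
  "BEGIN:VEVENT".toList ++ "\n".toList ++ e.flatMap lineF ++ ("END:VEVENT".toList ++ "\n".toList)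

theorem pv_A_eq (events : List (List (String × String))) (h : Pre_eventsToiCal events) :
    eventsToiCal events
      = String.mk (("BEGIN:VCALENDAR\nVERSION:2.0\nMETHOD:PUBLISH\nX-WR-CALNAME:Temp-name\nX-WR-CALDESC:Date limit -\nX-PUBLISHED-TTL:PT20M\nCALSCALE:GREGORIAN\nPRODID:Temp-prod-id").toList ++ "\n".toList
          ++ events.flatMap blockF ++ ("END:VCALENDAR".toList ++ "\n".toList)) := by
  unfold eventsToiCal
  rw [PySem.List.foldl_congr_mem _ _ (fun o e => o ++ blockF e) _ (fun acc e he => ?_),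
      PySem.List.foldl_append_eq_flatMap]
  rw [PySem.List.foldl_append_eq_flatMap, List.flatMap_map]
  rw [List.flatMap_congr (g := lineF) (fun kv hkv => ?_)]
  · simp [blockF, List.append_assoc]
  · rw [pv_lookup_nodup e (h e he) kv hkv]
    simp [lineF, pv_escA_eq]

theorem pv_vevent_eq (e : List (String × String)) : veventB e = blockF e := by
  unfold veventB blockF
  rw [List.flatten_eq_flatMap, List.flatMap_map]
  rw [List.flatMap_congr (g := lineF) (fun kv _ => by simp [lineF, pv_escB_eq])]
  simp

theorem pv_blocks_eq (fuel : Nat) (events : List (List (String × String)))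
    (h : events.length ≤ fuel) : blocksB fuel events = events.flatMap blockF := by
  induction fuel generalizing events with
  | zero =>
    match events, h with
    | [], _ => simp [blocksB]
    | [e], _ => simp [blocksB, pv_vevent_eq]
  | succ f ih =>
    match events with
    | [] => simp [blocksB]
    | [e] => simp [blocksB, pv_vevent_eq]
    | e1 :: e2 :: rest =>
      rw [blocksB,
          ih _ (by simp only [List.length_take, List.length_cons] at *; omega),
          ih _ (by simp only [List.length_drop, List.length_cons] at *; omega),
          ← List.flatMap_append, List.take_append_drop]

-- ===== VERDICT (by name: the statement is the Claim_ definition above) =====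
set_option maxRecDepth 8192 in
theorem eventsToiCal_spec : Claim_equal_eventsToiCal := by
  intro events _ hpre
  unfold Spec_eventsToiCal eventsToiCal_alt
  rw [pv_A_eq events hpre, pv_blocks_eq events.length events le_rfl]
  rfl
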